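-- pv_equiv track=rewrite | github.com/bomcon123456/prata | src/prata/specifics/kidnap/idd.py | get_rider_and_bike
-- ===== SOURCE A (Python) =====
-- def get_rider_and_bike(objects):
--     res = []
--     riders = []
--     bikes = []
--     bicycles = []
--     l = {"rider": riders, "motorcycle": bikes, "bicycle": bicycles}
--     for obj in objects:
--         if obj["name"] in ["rider", "motorcycle", "bicycle"]:
--             res.append(obj)
--             l[obj["name"]].append(obj)
--     return res, l
-- ===== SOURCE B (Python) =====
-- def get_rider_and_bike(objects):
--     res = [obj for obj in objects if obj["name"] in ("rider", "motorcycle", "bicycle")]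
--     riders = [obj for obj in objects if obj["name"] == "rider"]
--     bikes = [obj for obj in objects if obj["name"] == "motorcycle"]
--     bicycles = [obj for obj in objects if obj["name"] == "bicycle"]
--     l = {"rider": riders, "motorcycle": bikes, "bicycle": bicycles}
--     return res, l
-- ===== Notes on version B (the rewrite author's own statement) =====
-- stated objective: idiomatic
-- what changed: Replaced the single dispatching loop appending through an aliased dict of buckets with four independent filtering comprehensions (one per output list), building the result dict at the end.
import Mathlib
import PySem

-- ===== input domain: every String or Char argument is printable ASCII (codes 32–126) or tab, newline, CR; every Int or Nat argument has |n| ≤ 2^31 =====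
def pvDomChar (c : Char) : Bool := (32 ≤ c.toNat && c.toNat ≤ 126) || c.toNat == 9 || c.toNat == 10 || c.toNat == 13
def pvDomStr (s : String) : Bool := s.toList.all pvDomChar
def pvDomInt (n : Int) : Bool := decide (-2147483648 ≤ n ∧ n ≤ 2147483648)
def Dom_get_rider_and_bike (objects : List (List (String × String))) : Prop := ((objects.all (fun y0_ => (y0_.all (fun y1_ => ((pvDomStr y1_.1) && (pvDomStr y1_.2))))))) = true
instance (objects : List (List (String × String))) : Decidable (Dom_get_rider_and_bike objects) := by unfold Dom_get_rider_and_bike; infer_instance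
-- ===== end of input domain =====

-- B is the idiomatic multi-pass decomposition: four independent filters instead of one dispatching loop through an aliased dict of buckets.
-- Pre_ excludes inputs where some object lacks a "name" key, on which Python A raises KeyError.

-- ===== PORT A =====
-- obj["name"]: dicts arrive as assoc lists; first-match lookup (exact for Python dict access); 'none' (KeyError in Python) is excluded by Pre_, the fold skips there.
def pvName (obj : List (String × String)) : Option String := List.lookup "name" obj

def pvStepA (st : List (List (String × String)) × List (List (String × String)) × List (List (String × String)) × List (List (String × String)))
    (obj : List (String × String)) :
    List (List (String × String)) × List (List (String × String)) × List (List (String × String)) × List (List (String × String)) :=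
  match pvName obj with
  | none => st
  | some n =>
    if n = "rider" ∨ n = "motorcycle" ∨ n = "bicycle" then
      (st.1 ++ [obj],
       if n = "rider" then st.2.1 ++ [obj] else st.2.1,
       if n = "motorcycle" then st.2.2.1 ++ [obj] else st.2.2.1,
       if n = "bicycle" then st.2.2.2 ++ [obj] else st.2.2.2)
    else st

def get_rider_and_bike (objects : List (List (String × String))) : (List (List (String × String))) × (List (String × List (List (String × String)))) :=
  let st := objects.foldl pvStepA ([], [], [], [])
  (st.1, [("rider", st.2.1), ("motorcycle", st.2.2.1), ("bicycle", st.2.2.2)])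

-- ===== PORT B =====
def get_rider_and_bike_alt (objects : List (List (String × String))) : (List (List (String × String))) × (List (String × List (List (String × String)))) :=
  let res := objects.filter (fun obj => decide (pvName obj = some "rider" ∨ pvName obj = some "motorcycle" ∨ pvName obj = some "bicycle"))
  let riders := objects.filter (fun obj => pvName obj == some "rider")
  let bikes := objects.filter (fun obj => pvName obj == some "motorcycle")
  let bicycles := objects.filter (fun obj => pvName obj == some "bicycle")
  (res, [("rider", riders), ("motorcycle", bikes), ("bicycle", bicycles)])

-- ===== PRECONDITION & SPEC =====
-- Pre_: every object has a "name" key (otherwise Python A raises KeyError).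
def Pre_get_rider_and_bike (objects : List (List (String × String))) : Prop :=
  ∀ obj ∈ objects, (pvName obj).isSome
instance (objects : List (List (String × String))) : Decidable (Pre_get_rider_and_bike objects) := by unfold Pre_get_rider_and_bike; infer_instance
def pvWitness_get_rider_and_bike : (List (List (String × String))) := [[("name", "rider")], [("name", "car")]]
def Spec_get_rider_and_bike (objects : List (List (String × String))) (out : (List (List (String × String))) × (List (String × List (List (String × String))))) : Prop := out = get_rider_and_bike_alt objects
instance (objects : List (List (String × String))) (out : (List (List (String × String))) × (List (String × List (List (String × String))))) : Decidable (Spec_get_rider_and_bike objects out) := by unfold Spec_get_rider_and_bike; infer_instance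

-- ===== CLAIM (what is proved, stated in full; the proofs are below) =====
def Claim_equal_get_rider_and_bike : Prop := ∀ (objects : List (List (String × String))), Dom_get_rider_and_bike objects → Pre_get_rider_and_bike objects → Spec_get_rider_and_bike objects (get_rider_and_bike objects)

-- ===== LEMMAS AND PROOFS =====
theorem foldlA_char (objects : List (List (String × String)))
    (res r b c : List (List (String × String))) :
    objects.foldl pvStepA (res, r, b, c) =
      (res ++ objects.filter (fun obj => decide (pvName obj = some "rider" ∨ pvName obj = some "motorcycle" ∨ pvName obj = some "bicycle")),
       r ++ objects.filter (fun obj => pvName obj == some "rider"),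
       b ++ objects.filter (fun obj => pvName obj == some "motorcycle"),
       c ++ objects.filter (fun obj => pvName obj == some "bicycle")) := by
  induction objects generalizing res r b c with
  | nil => simp
  | cons obj rest ih =>
    simp only [List.foldl_cons, List.filter_cons]
    rcases h : pvName obj with _ | n
    · simp [pvStepA, h, ih]
    · by_cases h1 : n = "rider"
      · subst h1; simp [pvStepA, h, ih]
      · by_cases h2 : n = "motorcycle"
        · subst h2; simp [pvStepA, h, ih]
        · by_cases h3 : n = "bicycle"
          · subst h3; simp [pvStepA, h, h1, h2, ih]
          · simp [pvStepA, h, h1, h2, h3, ih]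

-- ===== VERDICT (by name: the statement is the Claim_ definition above) =====
theorem get_rider_and_bike_spec : Claim_equal_get_rider_and_bike := by
  intro objects _ _
  unfold Spec_get_rider_and_bike get_rider_and_bike get_rider_and_bike_alt
  simp [foldlA_char]
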